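-- pv_equiv track=rewrite | github.com/calchen01/RobotNLP | r2d2_commands.py | extractCoord
-- ===== SOURCE A (Python) =====
-- def extractCoord(words):
--     ret = []
--     for i in range(len(words) - 1, -1, -1):
--         word = words[i]
--         if word.isdigit():
--             ret = [int(word)] + ret
--         if word in {"to", "too"}:
--             ret = [2] + ret
--         if len(ret) == 2:
--             break
--     return ret
-- ===== SOURCE B (Python) =====
-- def extractCoord(words):
--     nums = []
--     for word in words:
--         if word.isdigit():
--             nums.append(int(word))
--         elif word in ("to", "too"):
--             nums.append(2)
--     return nums[-2:]
-- ===== Notes on version B (the rewrite author's own statement) =====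
-- stated objective: simpler
-- what changed: One forward pass appending each word's contribution, then a final slice nums[-2:], instead of A's backward index loop that prepends and breaks early at two elements.
import Mathlib
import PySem

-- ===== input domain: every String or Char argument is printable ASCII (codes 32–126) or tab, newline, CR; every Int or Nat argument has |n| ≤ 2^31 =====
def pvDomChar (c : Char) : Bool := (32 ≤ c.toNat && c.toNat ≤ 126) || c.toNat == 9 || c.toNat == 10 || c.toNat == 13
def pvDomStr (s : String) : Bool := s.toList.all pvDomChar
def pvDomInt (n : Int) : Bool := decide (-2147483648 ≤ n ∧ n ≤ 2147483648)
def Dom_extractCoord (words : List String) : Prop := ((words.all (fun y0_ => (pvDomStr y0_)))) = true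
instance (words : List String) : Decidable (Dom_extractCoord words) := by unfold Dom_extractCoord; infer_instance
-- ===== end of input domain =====

-- B replaces A's backward index loop (prepend, break at two) by one forward pass
-- collecting every contribution and a final nums[-2:] slice; objective: simpler.

-- ===== PORT A =====
-- A's 'for i in range(len(words)-1, -1, -1)' visits the words back to front, so the
-- loop is structural recursion over words.reverse carrying 'ret'; the 'break' is the
-- early return when len(ret) == 2.  int(word) is (PySem.Int.ofStr? w).getD 0: the
-- isdigit guard guarantees int() succeeds, so the default is never used.
def extractCoordLoop : List String → List Int → List Int
  | [], ret => ret
  | w :: ws, ret =>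
    let ret1 := if PySem.Str.strIsdigit w then ((PySem.Int.ofStr? w).getD 0) :: ret else ret
    let ret2 := if w = "to" ∨ w = "too" then (2 : Int) :: ret1 else ret1
    if ret2.length = 2 then ret2 else extractCoordLoop ws ret2

def extractCoord (words : List String) : List Int :=
  extractCoordLoop words.reverse []

-- ===== PORT B =====
def extractCoord_alt (words : List String) : List Int :=
  let nums := words.foldl (fun acc w =>
    if PySem.Str.strIsdigit w then acc ++ [(PySem.Int.ofStr? w).getD 0]
    else if w = "to" ∨ w = "too" then acc ++ [(2 : Int)]
    else acc) []
  PySem.List.slice nums (some (-2)) none   -- nums[-2:]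

-- ===== PRECONDITION & SPEC =====
def Spec_extractCoord (words : List String) (out : List Int) : Prop := out = extractCoord_alt words
instance (words : List String) (out : List Int) : Decidable (Spec_extractCoord words out) := by unfold Spec_extractCoord; infer_instance

-- ===== CLAIM (what is proved, stated in full; the proofs are below) =====
def Claim_equal_extractCoord : Prop := ∀ (words : List String), Dom_extractCoord words → Spec_extractCoord words (extractCoord words)

-- ===== LEMMAS AND PROOFS =====

-- the value a single word contributes (at most one: a word is never both a digit and "to"/"too")
def pvContrib (w : String) : Option Int :=
  if PySem.Str.strIsdigit w then some ((PySem.Int.ofStr? w).getD 0)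
  else if w = "to" ∨ w = "too" then some 2
  else none

theorem pvContrib_not_digit (w : String) (h : w = "to" ∨ w = "too") :
    PySem.Str.strIsdigit w = false := by
  rcases h with h | h <;> subst h <;> decide

theorem pvContrib_digit (w : String) (hd : PySem.Str.strIsdigit w = true) :
    pvContrib w = some ((PySem.Int.ofStr? w).getD 0) := by
  unfold pvContrib; rw [if_pos hd]

theorem pvContrib_to (w : String) (hd : ¬ PySem.Str.strIsdigit w = true)
    (ht : w = "to" ∨ w = "too") : pvContrib w = some 2 := by
  unfold pvContrib; rw [if_neg hd, if_pos ht]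

theorem pvContrib_none (w : String) (hd : ¬ PySem.Str.strIsdigit w = true)
    (ht : ¬ (w = "to" ∨ w = "too")) : pvContrib w = none := by
  unfold pvContrib; rw [if_neg hd, if_neg ht]

theorem extractCoordLoop_eq (l : List String) :
    ∀ ret : List Int, ret.length ≤ 1 →
      extractCoordLoop l ret = ((l.filterMap pvContrib).take (2 - ret.length)).reverse ++ ret := by
  induction l with
  | nil => intro ret _; simp [extractCoordLoop]
  | cons w ws ih =>
    intro ret hr
    simp only [extractCoordLoop]
    by_cases hd : PySem.Str.strIsdigit w = true
    · have hto : ¬ (w = "to" ∨ w = "too") := by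
        intro h; rw [pvContrib_not_digit w h] at hd; exact absurd hd (by simp)
      rw [if_pos hd, if_neg hto]
      have hc := pvContrib_digit w hd
      rcases ret with _ | ⟨a, _ | ⟨b, t⟩⟩
      · rw [if_neg (by simp), ih _ (by simp)]
        simp [hc, List.take_succ_cons]
      · rw [if_pos (by simp)]
        simp [hc, List.take_succ_cons]
      · simp at hr
    · by_cases ht : w = "to" ∨ w = "too"
      · rw [if_neg hd, if_pos ht]
        have hc := pvContrib_to w hd ht
        rcases ret with _ | ⟨a, _ | ⟨b, t⟩⟩
        · rw [if_neg (by simp), ih _ (by simp)]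
          simp [hc, List.take_succ_cons]
        · rw [if_pos (by simp)]
          simp [hc, List.take_succ_cons]
        · simp at hr
      · rw [if_neg hd, if_neg ht, if_neg (by omega), ih _ hr]
        simp [pvContrib_none w hd ht]

theorem extractCoord_alt_foldl (l : List String) :
    ∀ acc : List Int,
      l.foldl (fun acc w =>
        if PySem.Str.strIsdigit w then acc ++ [(PySem.Int.ofStr? w).getD 0]
        else if w = "to" ∨ w = "too" then acc ++ [(2 : Int)]
        else acc) acc = acc ++ l.filterMap pvContrib := by
  induction l with
  | nil => intro acc; simp
  | cons w ws ih =>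
    intro acc
    simp only [List.foldl_cons]
    by_cases hd : PySem.Str.strIsdigit w = true
    · rw [if_pos hd, ih]
      simp [pvContrib_digit w hd]
    · by_cases ht : w = "to" ∨ w = "too"
      · rw [if_neg hd, if_pos ht, ih]
        simp [pvContrib_to w hd ht]
      · rw [if_neg hd, if_neg ht, ih]
        simp [pvContrib_none w hd ht]

-- ===== VERDICT (by name: the statement is the Claim_ definition above) =====
theorem extractCoord_spec : Claim_equal_extractCoord := by
  intro words _
  unfold Spec_extractCoord extractCoord extractCoord_alt
  rw [extractCoordLoop_eq _ [] (by simp), extractCoord_alt_foldl]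
  rw [PySem.List.slice_from_neg_ofNat _ 2 (by omega)]
  simp only [List.length_nil, List.append_nil, List.nil_append, Nat.sub_zero,
    List.filterMap_reverse]
  rw [List.take_reverse, List.reverse_reverse]
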